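-- pv_equiv track=rewrite | github.com/pypi-data/pypi-mirror-402 | packages/osbot-utils/osbot_utils-3.72.0.tar.gz/osbot_utils-3.72.0/osbot_utils/helpers/llms/actions/Type_Safe__Schema_For__LLMs.py | clean_docstring
-- ===== SOURCE A (Python) =====
-- def clean_docstring(docstring: str) -> str:                                   # Cleans up a docstring
--     if not docstring:
--         return ""
--     lines = docstring.splitlines()
--
--     while lines and not lines[0].strip():                                           # Remove empty lines at the beginning
--         lines.pop(0)
--
--     while lines and not lines[-1].strip():                                          # Remove empty lines at the end
--         lines.pop()
--
--     indent = min((len(line) - len(line.lstrip())                                    # Find minimum indentation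
--                  for line in lines if line.strip()), default=0)
--
--     return '\n'.join(line[indent:] for line in lines)                               # Remove indentation and join lines
-- ===== SOURCE B (Python) =====
-- def clean_docstring(docstring: str) -> str:
--     core = []                                   # trimmed lines collected so far
--     pending = []                                # blank lines seen after the last non-blank line
--     indent = None                               # running minimum indentation of non-blank lines
--     for line in docstring.splitlines():
--         if line.strip():
--             core.extend(pending)
--             pending = []
--             core.append(line)
--             w = len(line) - len(line.lstrip())
--             if indent is None or w < indent:
--                 indent = w
--         elif core:
--             pending.append(line)
--     if not core:
--         return ''
--     return '\n'.join(line[indent:] for line in core)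
-- ===== Notes on version B (the rewrite author's own statement) =====
-- stated objective: alternative
-- what changed: A trims leading blank lines with pop(0) loops, trims trailing blank lines with pop() loops, then runs a separate min() scan for the common indentation and a final join; B makes a single fold over the lines that accumulates the trimmed body (a core list plus a pending buffer of interior blank lines) together with the running minimum indentation, then joins.
import Mathlib
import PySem

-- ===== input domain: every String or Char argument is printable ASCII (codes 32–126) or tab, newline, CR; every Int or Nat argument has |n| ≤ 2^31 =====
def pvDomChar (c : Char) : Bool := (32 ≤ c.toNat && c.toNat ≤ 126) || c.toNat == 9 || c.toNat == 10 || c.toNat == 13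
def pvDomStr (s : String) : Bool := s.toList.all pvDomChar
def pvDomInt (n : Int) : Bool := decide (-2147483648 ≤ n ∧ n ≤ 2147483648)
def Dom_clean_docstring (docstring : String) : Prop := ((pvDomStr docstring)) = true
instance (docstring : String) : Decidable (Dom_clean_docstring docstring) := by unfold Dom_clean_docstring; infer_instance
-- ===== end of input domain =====

-- B replaces A's two pop-based trim loops plus a separate min() scan by a single fold that
-- collects the trimmed body and the running minimum indentation in one pass (objective: alternative).

-- shared one-liners, read off the Python sources: `line.strip()` truthiness and len(line)-len(line.lstrip())
def pvBlank (l : String) : Bool := PySem.Str.strip l == ""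
def pvInd (l : String) : Int := PySem.Str.len l - PySem.Str.len (PySem.Str.lstrip l)

-- ===== PORT A =====
-- while lines and not lines[0].strip(): lines.pop(0)
def pvTrimFrontA : List String → List String
  | [] => []
  | l :: ls => if pvBlank l then pvTrimFrontA ls else l :: ls

-- while lines and not lines[-1].strip(): lines.pop()
def pvTrimBackA (ls : List String) : List String :=
  if h : ls.getLast?.any pvBlank then pvTrimBackA ls.dropLast else ls
termination_by ls.length
decreasing_by
  cases ls with
  | nil => simp at h
  | cons a as => clear h; simp [List.length_dropLast]

def clean_docstring (docstring : String) : String :=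
  if docstring == "" then ""
  else
    let lines0 := PySem.Str.splitlines docstring
    let lines1 := pvTrimFrontA lines0
    let lines2 := pvTrimBackA lines1
    let indent : Int :=
      PySem.List.minD ((lines2.filter (fun l => !pvBlank l)).map pvInd) (fun x => x) 0
    PySem.Str.join "\n" (lines2.map (fun l => PySem.Str.slice l (some indent) none))

-- ===== PORT B =====
-- one step of B's loop body; state = (core, pending, indent)
def pvStepB : (List String × List String × Option Int) → String → (List String × List String × Option Int)
  | (core, pending, indent), line =>
    if !pvBlank line then
      let w : Int := pvInd line
      let indent' : Option Int :=
        match indent with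
        | none => some w
        | some v => if w < v then some w else some v
      (core ++ pending ++ [line], [], indent')
    else if !core.isEmpty then (core, pending ++ [line], indent)
    else (core, pending, indent)

def clean_docstring_alt (docstring : String) : String :=
  let st := (PySem.Str.splitlines docstring).foldl pvStepB ([], [], none)
  if st.1.isEmpty then ""
  else PySem.Str.join "\n" (st.1.map (fun l => PySem.Str.slice l (some (st.2.2.getD 0)) none))

-- ===== PRECONDITION & SPEC =====
def Spec_clean_docstring (docstring : String) (out : String) : Prop := out = clean_docstring_alt docstring
instance (docstring : String) (out : String) : Decidable (Spec_clean_docstring docstring out) := by unfold Spec_clean_docstring; infer_instance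

-- ===== CLAIM (what is proved, stated in full; the proofs are below) =====
def Claim_equal_clean_docstring : Prop := ∀ (docstring : String), Dom_clean_docstring docstring → Spec_clean_docstring docstring (clean_docstring docstring)

-- ===== LEMMAS AND PROOFS =====

-- proof-side helpers
def pvTrimEnd (ls : List String) : List String := (ls.reverse.dropWhile pvBlank).reverse
def pvMinFold (v : Int) (ls : List String) : Int :=
  ls.foldl (fun v l => if pvBlank l then v else min v (pvInd l)) v

lemma pvTrimFrontA_eq (ls : List String) : pvTrimFrontA ls = ls.dropWhile pvBlank := by
  induction ls with
  | nil => rfl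
  | cons l ls ih =>
    rw [pvTrimFrontA, List.dropWhile_cons]
    cases h : pvBlank l <;> simp [ih]

lemma pvTrimBackA_eq (ls : List String) : pvTrimBackA ls = pvTrimEnd ls := by
  induction ls using List.reverseRecOn with
  | nil => rw [pvTrimBackA]; rfl
  | append_singleton as a ih =>
    rw [pvTrimBackA]
    cases h : pvBlank a with
    | true =>
      simp [h, ih, pvTrimEnd]
    | false =>
      simp [h, pvTrimEnd]

lemma pvTrimEnd_nil (ls : List String) (h : ∀ x ∈ ls, pvBlank x = true) : pvTrimEnd ls = [] := by
  unfold pvTrimEnd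
  rw [List.dropWhile_eq_nil_iff.mpr (by intro x hx; exact h x (List.mem_reverse.mp hx))]
  rfl

lemma pvTrimEnd_append_cons (xs ys : List String) (l : String) (hl : pvBlank l = false) :
    pvTrimEnd (xs ++ l :: ys) = xs ++ l :: pvTrimEnd ys := by
  unfold pvTrimEnd
  rw [show (xs ++ l :: ys).reverse = ys.reverse ++ (l :: xs.reverse) by simp]
  rw [List.dropWhile_append]
  split_ifs with h
  · rw [List.isEmpty_iff] at h
    rw [h]
    simp [hl]
  · simp

lemma pvFilter_trimEnd (ys : List String) :
    (pvTrimEnd ys).filter (fun l => !pvBlank l) = ys.filter (fun l => !pvBlank l) := by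
  unfold pvTrimEnd
  rw [List.filter_reverse]
  have hnil : List.filter (fun l => !pvBlank l) (List.takeWhile pvBlank ys.reverse) = [] := by
    rw [List.filter_eq_nil_iff]
    intro x hx
    have := List.mem_takeWhile_imp hx
    simp [this]
  have hx : List.filter (fun l => !pvBlank l) (List.dropWhile pvBlank ys.reverse)
      = List.filter (fun l => !pvBlank l) ys.reverse := by
    conv_rhs => rw [← List.takeWhile_append_dropWhile (p := pvBlank) (l := ys.reverse)]
    rw [List.filter_append, hnil, List.nil_append]
  rw [hx, List.filter_reverse, List.reverse_reverse]

lemma pvHead_dropWhile (xs : List String) (l : String) (ys : List String)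
    (h : xs.dropWhile pvBlank = l :: ys) : pvBlank l = false := by
  induction xs with
  | nil => simp at h
  | cons a as ih =>
    rw [List.dropWhile_cons] at h
    by_cases hb : pvBlank a = true
    · exact ih (by simpa [hb] using h)
    · simp [hb] at h
      obtain ⟨h1, _⟩ := h
      subst h1
      simpa using hb

lemma pvMinD_cons (i : Int) (is : List Int) :
    PySem.List.minD (i :: is) (fun x => x) 0 = is.foldl min i := by
  suffices h : ∀ (is : List Int) (i : Int),
      PySem.List.min? (i :: is) (fun x => x) = some (is.foldl min i) by
    unfold PySem.List.minD
    rw [h]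
    rfl
  intro is
  induction is with
  | nil => intro i; rfl
  | cons a as ih =>
    intro i
    have step : PySem.List.min? (i :: a :: as) (fun x => x) = PySem.List.min? (min i a :: as) (fun x => x) := by
      unfold PySem.List.min?
      simp only [List.foldl_cons]
      congr 1
      rw [min_def]
      split_ifs <;> first | rfl | omega
    rw [step, ih (min i a)]
    rfl

lemma pvMinFold_eq (ys : List String) (v : Int) :
    pvMinFold v ys = ((ys.filter (fun l => !pvBlank l)).map pvInd).foldl min v := by
  induction ys generalizing v with
  | nil => rfl
  | cons l ls ih =>
    unfold pvMinFold
    rw [List.filter_cons]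
    cases h : pvBlank l with
    | true => simpa [h, pvMinFold] using ih v
    | false => simpa [h, pvMinFold] using ih (min v (pvInd l))

lemma pvFold_phase2 (ls : List String) : ∀ (cs pending : List String) (c : String) (v : Int),
    (∀ x ∈ pending, pvBlank x = true) →
    ∃ pend', (∀ x ∈ pend', pvBlank x = true) ∧
      ls.foldl pvStepB (c :: cs, pending, some v) =
        (c :: cs ++ pvTrimEnd (pending ++ ls), pend', some (pvMinFold v ls)) := by
  induction ls with
  | nil =>
    intro cs pending c v hp
    refine ⟨pending, hp, ?_⟩
    simp [pvTrimEnd_nil pending hp, pvMinFold]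
  | cons l ls ih =>
    intro cs pending c v hp
    cases hb : pvBlank l with
    | true =>
      have hstep : pvStepB (c :: cs, pending, some v) l = (c :: cs, pending ++ [l], some v) := by
        simp [pvStepB, hb]
      obtain ⟨pend', hp', heq⟩ := ih cs (pending ++ [l]) c v
        (by intro x hx; rcases List.mem_append.mp hx with h1 | h2
            · exact hp x h1
            · simp at h2; subst h2; exact hb)
      refine ⟨pend', hp', ?_⟩
      rw [List.foldl_cons, hstep, heq]
      have hmf : pvMinFold v (l :: ls) = pvMinFold v ls := by simp [pvMinFold, hb]
      rw [hmf]
      simp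
    | false =>
      have hstep : pvStepB (c :: cs, pending, some v) l =
          (c :: (cs ++ pending ++ [l]), [], some (min v (pvInd l))) := by
        simp only [pvStepB, hb, Bool.not_false, if_true]
        refine Prod.ext (by simp) (Prod.ext rfl ?_)
        simp only
        rw [min_def]
        split_ifs <;> first | rfl | omega
      obtain ⟨pend', hp', heq⟩ := ih (cs ++ pending ++ [l]) [] c (min v (pvInd l)) (by simp)
      refine ⟨pend', hp', ?_⟩
      rw [List.foldl_cons, hstep, heq]
      have hcore : c :: (cs ++ pending ++ [l]) ++ pvTrimEnd ([] ++ ls)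
          = c :: cs ++ pvTrimEnd (pending ++ l :: ls) := by
        rw [pvTrimEnd_append_cons pending ls l hb]
        simp
      rw [hcore]
      have hmf : pvMinFold v (l :: ls) = pvMinFold (min v (pvInd l)) ls := by
        simp [pvMinFold, hb]
      rw [hmf]
  
lemma pvFold_phase1 (ls : List String) :
    ls.foldl pvStepB ([], [], none) = (ls.dropWhile pvBlank).foldl pvStepB ([], [], none) := by
  induction ls with
  | nil => rfl
  | cons l ls ih =>
    rw [List.dropWhile_cons]
    cases hb : pvBlank l with
    | true =>
      have hstep : pvStepB ([], [], none) l = ([], [], none) := by simp [pvStepB, hb]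
      rw [List.foldl_cons, hstep, ih]
      simp
    | false => rfl

-- ===== VERDICT (by name: the statement is the Claim_ definition above) =====
theorem clean_docstring_spec : Claim_equal_clean_docstring := by
  intro docstring _
  unfold Spec_clean_docstring
  by_cases hd : docstring = ""
  · subst hd; rfl
  · have hbe : (docstring == "") = false := by simpa using hd
    unfold clean_docstring clean_docstring_alt
    simp only [hbe, Bool.false_eq_true, if_false]
    generalize PySem.Str.splitlines docstring = lines
    rw [pvTrimFrontA_eq, pvFold_phase1]
    cases h : lines.dropWhile pvBlank with
    | nil =>
      rw [pvTrimBackA_eq, pvTrimEnd_nil [] (by simp)]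
      rfl
    | cons l rest =>
      have hl : pvBlank l = false := pvHead_dropWhile lines l rest h
      rw [pvTrimBackA_eq]
      have htrim : pvTrimEnd (l :: rest) = l :: pvTrimEnd rest := by
        simpa using pvTrimEnd_append_cons [] rest l hl
      rw [htrim]
      have hstep : pvStepB ([], [], none) l = ([l], [], some (pvInd l)) := by
        simp [pvStepB, hl]
      obtain ⟨pend', _, heq⟩ := pvFold_phase2 rest [] [] l (pvInd l) (by simp)
      rw [List.foldl_cons, hstep, heq]
      simp only [List.nil_append, List.cons_append]
      have hind : PySem.List.minD (((l :: pvTrimEnd rest).filter (fun l => !pvBlank l)).map pvInd) (fun x => x) 0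
          = pvMinFold (pvInd l) rest := by
        rw [List.filter_cons_of_pos (by simp [hl]), pvFilter_trimEnd, List.map_cons,
          pvMinD_cons, pvMinFold_eq]
      rw [hind]
      simp
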